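-- pv_equiv track=rewrite | github.com/AdamBrauns/udemy-courses | python_complete_course/section_6/function_practice_exercises.py | summer_69_2
-- ===== SOURCE A (Python) =====
-- def summer_69_2(arr):
--     '''
--     SUMMER OF '69: Return the sum of the numbers in the array, except ignore
--     sections of numbers starting with a 6 and extending to the next 9 (every 6
--     will be followed by at least one 9). Return 0 for no numbers.
--     '''
--     total = 0
--     add = True
--
--     for num in arr:
--         while add:
--             if num != 6:
--                 total += num
--                 break
--             else:
--                 add = False
--         while not add:
--             if num != 9:
--                 break
--             else:
--                 add = True
--                 break
--     return total
-- ===== SOURCE B (Python) =====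
-- def summer_69_2(arr):
--     total = 0
--     it = iter(arr)
--     for num in it:
--         if num == 6:
--             for x in it:
--                 if x == 9:
--                     break
--         else:
--             total += num
--     return total
-- ===== Notes on version B (the rewrite author's own statement) =====
-- stated objective: simpler
-- what changed: Replaces the boolean add flag and the two while-loop state toggles with a shared iterator whose nested loop consumes a whole 6..9 run inline.
import Mathlib
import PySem

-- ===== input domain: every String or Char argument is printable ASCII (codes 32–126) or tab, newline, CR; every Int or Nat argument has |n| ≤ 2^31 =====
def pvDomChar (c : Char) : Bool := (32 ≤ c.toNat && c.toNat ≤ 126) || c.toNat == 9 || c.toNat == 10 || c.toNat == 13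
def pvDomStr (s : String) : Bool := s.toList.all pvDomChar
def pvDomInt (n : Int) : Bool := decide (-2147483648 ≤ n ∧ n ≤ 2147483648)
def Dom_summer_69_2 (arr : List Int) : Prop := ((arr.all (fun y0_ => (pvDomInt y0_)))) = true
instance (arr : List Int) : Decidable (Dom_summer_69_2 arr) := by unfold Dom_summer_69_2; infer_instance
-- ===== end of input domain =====

-- ===== PORT A =====
-- A: single pass with a boolean `add` flag; the two Python while-loops each
-- execute at most one effective step, transcribed as the two `if`s below.
def summer_69_2Step (s : Int × Bool) (num : Int) : Int × Bool :=
  -- while add: if num != 6 then total += num; break else add = False (loop re-tests, exits)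
  let s1 : Int × Bool := if s.2 then (if num ≠ 6 then (s.1 + num, true) else (s.1, false)) else s
  -- while not add: if num != 9 then break else add = True; break
  if ¬ s1.2 then (if num ≠ 9 then s1 else (s1.1, true)) else s1

def summer_69_2 (arr : List Int) : Int :=
  (arr.foldl summer_69_2Step (0, true)).1

-- ===== PORT B =====
-- B: the inner `for x in it: if x == 9: break` that advances the shared iterator
def skipRun_summer69 : List Int → List Int
  | [] => []
  | x :: rest => if x = 9 then rest else skipRun_summer69 rest

theorem skipRun_summer69_length_le : ∀ (l : List Int), (skipRun_summer69 l).length ≤ l.length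
  | [] => Nat.le_refl _
  | x :: rest => by
      unfold skipRun_summer69
      split
      · exact Nat.le_succ _
      · exact Nat.le_trans (skipRun_summer69_length_le rest) (Nat.le_succ _)

-- the outer `for num in it`, over the rest of the iterator
def summer_69_2_altGo (arr : List Int) (total : Int) : Int :=
  match arr with
  | [] => total
  | num :: rest =>
      if num = 6 then summer_69_2_altGo (skipRun_summer69 rest) total
      else summer_69_2_altGo rest (total + num)
termination_by arr.length
decreasing_by
  · exact Nat.lt_succ_of_le (skipRun_summer69_length_le rest)
  · exact Nat.lt_succ_self _

def summer_69_2_alt (arr : List Int) : Int := summer_69_2_altGo arr 0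

-- ===== PRECONDITION & SPEC =====
def Spec_summer_69_2 (arr : List Int) (out : Int) : Prop := out = summer_69_2_alt arr
instance (arr : List Int) (out : Int) : Decidable (Spec_summer_69_2 arr out) := by unfold Spec_summer_69_2; infer_instance

-- ===== CLAIM (what is proved, stated in full; the proofs are below) =====
def Claim_equal_summer_69_2 : Prop := ∀ (arr : List Int), Dom_summer_69_2 arr → Spec_summer_69_2 arr (summer_69_2 arr)

-- ===== LEMMAS AND PROOFS =====
theorem summer69_fold_eq (arr : List Int) :
    (∀ t : Int, (arr.foldl summer_69_2Step (t, true)).1 = summer_69_2_altGo arr t) ∧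
    (∀ t : Int, (arr.foldl summer_69_2Step (t, false)).1 = summer_69_2_altGo (skipRun_summer69 arr) t) := by
  induction arr with
  | nil => exact ⟨fun t => by simp [summer_69_2_altGo], fun t => by simp [skipRun_summer69, summer_69_2_altGo]⟩
  | cons x rest ih =>
    constructor
    · intro t
      by_cases h6 : x = 6
      · subst h6
        simp only [List.foldl, summer_69_2Step]
        norm_num
        rw [ih.2 t]
        rw [summer_69_2_altGo]
        norm_num
      · simp only [List.foldl, summer_69_2Step]
        simp [h6]
        rw [ih.1 (t + x)]
        rw [summer_69_2_altGo]
        simp [h6]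
    · intro t
      by_cases h9 : x = 9
      · subst h9
        simp only [List.foldl, summer_69_2Step]
        norm_num
        rw [ih.1 t, skipRun_summer69]
        norm_num
      · simp only [List.foldl, summer_69_2Step]
        simp [h9]
        rw [ih.2 t, skipRun_summer69]
        simp [h9]

-- ===== VERDICT (by name: the statement is the Claim_ definition above) =====
theorem summer_69_2_spec : Claim_equal_summer_69_2 := by
  intro arr _
  unfold Spec_summer_69_2 summer_69_2 summer_69_2_alt
  exact (summer69_fold_eq arr).1 0
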